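-- pv_equiv track=rewrite | github.com/asebn1/python_algorithm | 프로그래머스 3단계/41. 최고의집합.py | solution
-- ===== SOURCE A (Python) =====
-- def solution(n, s):
--     mok = s // n
--     na = s % n
--     if mok == 0:
--         return [-1]
--
--     result = [mok] * n
--     for i in range(na):
--         result[i] += 1
--     result.sort()
--     return result
-- ===== SOURCE B (Python) =====
-- def solution(n, s):
--     if s // n == 0:
--         return [-1]
--     result = []
--     rem = s
--     for k in range(n, 0, -1):
--         result.append(rem // k)
--         rem -= rem // k
--     return result
-- ===== Notes on version B (the rewrite author's own statement) =====
-- stated objective: alternative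
-- what changed: B replaces A's divmod-split / fill-list / increment-prefix / sort pipeline with a single greedy pass that, with k slots remaining, emits rem // k and subtracts it, producing the balanced sorted list directly without computing s % n or sorting.
import Mathlib
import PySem

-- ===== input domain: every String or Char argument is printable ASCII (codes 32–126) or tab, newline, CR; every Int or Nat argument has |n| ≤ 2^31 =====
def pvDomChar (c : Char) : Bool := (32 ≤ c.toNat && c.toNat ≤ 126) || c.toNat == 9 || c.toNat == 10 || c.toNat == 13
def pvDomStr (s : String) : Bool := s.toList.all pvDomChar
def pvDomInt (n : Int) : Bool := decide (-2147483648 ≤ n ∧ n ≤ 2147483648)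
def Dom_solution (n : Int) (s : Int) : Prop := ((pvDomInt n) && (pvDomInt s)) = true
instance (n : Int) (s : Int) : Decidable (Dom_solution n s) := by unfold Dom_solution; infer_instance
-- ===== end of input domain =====

-- B replaces A's fill-increment-sort with a single greedy pass: with k slots left it emits rem // k
-- and subtracts it, which yields the balanced sorted list directly (no divmod split, no sort).
-- ===== PORT A =====
def solution (n : Int) (s : Int) : List Int :=
  let mok := PySem.Int.floordiv s n
  let na := PySem.Int.mod s n
  if mok = 0 then [-1]
  else
    let result := PySem.List.pyRepeat [mok] n
    let result := (PySem.List.pyRange 0 na 1).foldl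
      (fun r i => PySem.List.pySetD r i (PySem.List.pyGetD r i 0 + 1)) result
    PySem.List.sorted result (fun x => x) false

-- ===== PORT B =====
def solution_alt (n : Int) (s : Int) : List Int :=
  if PySem.Int.floordiv s n = 0 then [-1]
  else
    let st := (PySem.List.pyRange n 0 (-1)).foldl
      (fun (p : List Int × Int) k =>
        (p.1 ++ [PySem.Int.floordiv p.2 k], p.2 - PySem.Int.floordiv p.2 k)) ([], s)
    st.1

-- ===== PRECONDITION & SPEC =====
-- Pre_ excludes only n = 0, on which Python's s // n raises ZeroDivisionError.
def Pre_solution (n : Int) (s : Int) : Prop := n ≠ 0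
instance (n : Int) (s : Int) : Decidable (Pre_solution n s) := by unfold Pre_solution; infer_instance
def pvWitness_solution : Int × Int := (3, 7)
def Spec_solution (n : Int) (s : Int) (out : List Int) : Prop := out = solution_alt n s
instance (n : Int) (s : Int) (out : List Int) : Decidable (Spec_solution n s out) := by unfold Spec_solution; infer_instance

-- ===== CLAIM (what is proved, stated in full; the proofs are below) =====
def Claim_equal_solution : Prop := ∀ (n : Int) (s : Int), Dom_solution n s → Pre_solution n s → Spec_solution n s (solution n s)

-- ===== LEMMAS AND PROOFS =====

-- After the loop over range(na), the list [mok]*len has its first na entries incremented.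
theorem loop_fill (mok : Int) (len : Nat) (na : Nat) (h : na ≤ len) :
    (PySem.List.pyRange 0 (na : Int) 1).foldl
      (fun r i => PySem.List.pySetD r i (PySem.List.pyGetD r i 0 + 1))
      (List.replicate len mok)
    = List.replicate na (mok + 1) ++ List.replicate (len - na) mok := by
  induction na with
  | zero => simp
  | succ k ih =>
    have hk : k ≤ len := Nat.le_of_succ_le h
    have hrange : PySem.List.pyRange 0 ((k : Int) + 1) 1
        = PySem.List.pyRange 0 (k : Int) 1 ++ [(k : Int)] := by
      simpa using PySem.List.pyRange_one_succ_right (a := 0) (b := (k : Int)) (by exact_mod_cast Nat.zero_le k)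
    rw [show ((Nat.succ k : Nat) : Int) = (k : Int) + 1 by push_cast; ring, hrange,
        List.foldl_append, ih hk]
    have hget : PySem.List.pyGetD
        (List.replicate k (mok + 1) ++ List.replicate (len - k) mok) (k : Int) 0 = mok := by
      have hrep : len - k = (len - k - 1) + 1 := by omega
      rw [hrep, List.replicate_succ]
      have h2 := PySem.List.pyGet?_append_length (pre := List.replicate k (mok + 1))
        (y := mok) (ys := List.replicate (len - k - 1) mok)
      rw [List.length_replicate] at h2
      simp [PySem.List.pyGetD]
    simp only [List.foldl_cons, List.foldl_nil, hget]
    rw [PySem.List.pySetD_natCast]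
    have hrep : len - k = (len - k - 1) + 1 := by omega
    rw [hrep, List.replicate_succ]
    rw [show (List.replicate k (mok+1) ++ mok :: List.replicate (len - k - 1) mok).set k (mok+1)
        = List.replicate k (mok+1) ++ (mok+1) :: List.replicate (len - k - 1) mok from by
      rw [List.set_append_right _ _ (by simp)]
      simp]
    rw [show k + 1 = Nat.succ k from rfl, List.replicate_succ']
    simp only [List.append_assoc, List.singleton_append]
    refine congrArg₂ (· ++ ·) rfl (congrArg₂ List.cons rfl (congrArg₂ List.replicate (by omega) rfl))

theorem sorted_two_blocks (mok : Int) (a b : Nat) :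
    PySem.List.sorted (List.replicate a (mok + 1) ++ List.replicate b mok) (fun x => x) false
    = List.replicate b mok ++ List.replicate a (mok + 1) := by
  apply PySem.List.sorted_id_eq_of_perm_of_pairwise
  · exact List.perm_append_comm
  · apply List.pairwise_append.mpr
    refine ⟨List.pairwise_replicate.mpr (Or.inr le_rfl),
            List.pairwise_replicate.mpr (Or.inr le_rfl), ?_⟩
    intro x hx y hy
    rw [List.eq_of_mem_replicate hx, List.eq_of_mem_replicate hy]
    omega

-- range(n, 0, -1) is the descending list [n, n-1, …, 1].
theorem pyRange_desc (n : Int) :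
    PySem.List.pyRange n 0 (-1) = (List.range n.toNat).map (fun (k : Nat) => n - (k : Int)) := by
  simp only [PySem.List.pyRange]
  norm_num
  rw [show (if 0 < n then n.toNat else 0) = n.toNat from by split_ifs with h <;> omega]
  exact List.map_congr_left (fun k _ => by ring)

-- Greedy invariant: folding rem//k over k = m, m-1, …, 1 appends the balanced sorted block.
theorem greedy (m : Nat) (hm : 0 < m) : ∀ (rem : Int) (acc : List Int),
    ((List.range m).map (fun (k : Nat) => ((m : Nat) : Int) - (k : Int))).foldl
      (fun (p : List Int × Int) k =>
        (p.1 ++ [PySem.Int.floordiv p.2 k], p.2 - PySem.Int.floordiv p.2 k)) (acc, rem)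
    = (acc ++ (List.replicate (m - (PySem.Int.mod rem m).toNat) (PySem.Int.floordiv rem m)
         ++ List.replicate (PySem.Int.mod rem m).toNat (PySem.Int.floordiv rem m + 1)), 0) := by
  induction m with
  | zero => omega
  | succ m ih =>
    intro rem acc
    have hdesc : (List.range (m + 1)).map (fun (k : Nat) => ((m + 1 : Nat) : Int) - (k : Int))
        = ((m + 1 : Nat) : Int) :: (List.range m).map (fun (k : Nat) => ((m : Nat) : Int) - (k : Int)) := by
      rw [List.range_succ_eq_map, List.map_cons, List.map_map]
      refine congrArg₂ List.cons (by push_cast; ring) (List.map_congr_left ?_)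
      intro k _
      simp only [Function.comp]
      push_cast; ring
    set q := PySem.Int.floordiv rem ((m + 1 : Nat) : Int) with hq
    have hpos : (0 : Int) < ((m + 1 : Nat) : Int) := by positivity
    have hr0 := PySem.Int.mod_nonneg (a := rem) hpos
    have hrlt := PySem.Int.mod_lt (a := rem) hpos
    set r := PySem.Int.mod rem ((m + 1 : Nat) : Int) with hr
    have hid : q * ((m : Int) + 1) + r = rem := by
      have h := PySem.Int.floordiv_mul_add_mod rem ((m + 1 : Nat) : Int)
      rw [← hq, ← hr, show ((m + 1 : Nat) : Int) = (m : Int) + 1 from by push_cast; ring] at h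
      exact h
    rw [hdesc, List.foldl_cons]
    rcases Nat.eq_zero_or_pos m with hm0 | hmpos
    · -- m = 0 : single step, k = 1
      subst hm0
      simp only [List.range_zero, List.map_nil, List.foldl_nil]
      have hq1 : PySem.Int.floordiv rem ((0 + 1 : Nat) : Int) = rem := by
        norm_num [PySem.Int.floordiv_eq_ediv_of_pos]
      have hr1 : r = 0 := by omega
      simp only [hr1, hq, hq1]
      simp
    · -- m ≥ 1 : one step then the IH on rem - q
      rw [ih hmpos (rem - q) (acc ++ [q])]
      have hmc : ((m : Nat) : Int) = ((m + 1 : Nat) : Int) - 1 := by push_cast; ring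
      rcases lt_or_eq_of_le (show r ≤ ((m : Nat) : Int) from by omega) with hcase | hcase
      · -- r < m : quotient stays q, remainder stays r
        have hq' : PySem.Int.floordiv (rem - q) ((m : Nat) : Int) = q := by
          rw [PySem.Int.floordiv_eq_iff_of_pos (by exact_mod_cast hmpos)]
          constructor <;> linarith [hid]
        have hr' : PySem.Int.mod (rem - q) ((m : Nat) : Int) = r := by
          have hid2 := PySem.Int.floordiv_mul_add_mod (rem - q) ((m : Nat) : Int)
          rw [hq'] at hid2; linarith [hid, hid2]
        rw [hq', hr']
        have hle : r.toNat + 1 ≤ m + 1 := by omega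
        rw [show (m + 1) - r.toNat = (m - r.toNat) + 1 from by omega, List.replicate_succ]
        simp
      · -- r = m : all remaining slots get q + 1
        have hq' : PySem.Int.floordiv (rem - q) ((m : Nat) : Int) = q + 1 := by
          rw [PySem.Int.floordiv_eq_iff_of_pos (by exact_mod_cast hmpos)]
          constructor <;> linarith [hid]
        have hr' : PySem.Int.mod (rem - q) ((m : Nat) : Int) = 0 := by
          have hid2 := PySem.Int.floordiv_mul_add_mod (rem - q) ((m : Nat) : Int)
          rw [hq'] at hid2; linarith [hid, hid2]
        rw [hq', hr']
        have hrt : r.toNat = m := by omega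
        rw [hrt, show (m + 1) - m = 1 from by omega]
        simp

-- ===== VERDICT (by name: the statement is the Claim_ definition above) =====
theorem solution_spec : Claim_equal_solution := by
  intro n s _ hn
  unfold Spec_solution solution solution_alt
  simp only []
  by_cases hm : PySem.Int.floordiv s n = 0
  · simp [hm]
  · simp only [hm]
    rcases lt_or_gt_of_ne hn with hneg | hpos
    · -- n < 0 : both sides are the empty list
      obtain ⟨h1, h2⟩ := PySem.Int.mod_neg_bounds (a := s) hneg
      have hrepA : PySem.List.pyRepeat [PySem.Int.floordiv s n] n = [] := by
        simp [PySem.List.pyRepeat_singleton, Int.toNat_of_nonpos (le_of_lt hneg)]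
      have hrange : PySem.List.pyRange 0 (PySem.Int.mod s n) 1 = [] := by
        rw [PySem.List.pyRange_one,
           show (PySem.Int.mod s n - 0).toNat = 0 from by omega]
        simp
      have hdesc : PySem.List.pyRange n 0 (-1) = [] := by
        rw [pyRange_desc, show n.toNat = 0 from by omega]
        simp
      rw [hrepA, hrange, hdesc]
      simp [PySem.List.sorted]
    · -- 0 < n
      have h0 := PySem.Int.mod_nonneg (a := s) hpos
      have hlt := PySem.Int.mod_lt (a := s) hpos
      set mok := PySem.Int.floordiv s n with hmok
      set na := PySem.Int.mod s n with hna
      have hnaNat : (na.toNat : Int) = na := Int.toNat_of_nonneg h0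
      have hle : na.toNat ≤ n.toNat := by omega
      have hnNat : ((n.toNat : Nat) : Int) = n := Int.toNat_of_nonneg (le_of_lt hpos)
      -- A's side: fill, increment, sort
      have hrepA : PySem.List.pyRepeat [mok] n = List.replicate n.toNat mok := by
        simp [PySem.List.pyRepeat_singleton]
      have hloop := loop_fill mok n.toNat na.toNat hle
      rw [hnaNat] at hloop
      -- B's side: the greedy pass
      have hB := greedy n.toNat (by omega) s []
      rw [hnNat] at hB
      rw [hrepA, hloop, sorted_two_blocks, pyRange_desc, hB]
      simp only [List.nil_append]
      rw [hmok, hna]
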